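-- pv_equiv track=rewrite | github.com/pypi-data/pypi-mirror-380 | packages/awt/awt-0.34.0-py3-none-any.whl/src/linkpreview.py | pick_primary_candidate
-- ===== SOURCE A (Python) =====
-- from typing import Optional, Dict, List, Tuple
--
-- def pick_primary_candidate(candidate_tokens: List[str], canonical_order: List[str],
--                           candnames: Dict[str, str]) -> Optional[str]:
--     """Choose primary candidate from list using canonical order as tiebreaker."""
--     if not candidate_tokens:
--         return None
--
--     # Map display names back to tokens if needed
--     normalized_tokens = []
--     for token in candidate_tokens:
--         if token in candnames:
--             normalized_tokens.append(token)
--         else: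
--             # Winner string may be a name; try reverse lookup
--             reverse_token = next((t for t, n in candnames.items() if n == token), token)
--             normalized_tokens.append(reverse_token)
--
--     # Use canonical order for consistent tiebreaking
--     order_tokens = list(canonical_order) if canonical_order else sorted(candnames.keys())
--     for token in order_tokens:
--         if token in normalized_tokens:
--             return token
--
--     return normalized_tokens[0] if normalized_tokens else None
-- ===== SOURCE B (Python) =====
-- from typing import Optional, Dict, List
--
-- def pick_primary_candidate(candidate_tokens: List[str], canonical_order: List[str],
--                            candnames: Dict[str, str]) -> Optional[str]:
--     """Choose primary candidate; first-occurrence index table + min-reduction over candidates."""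
--     if not candidate_tokens:
--         return None
--
--     # Map display names back to tokens if needed
--     normalized_tokens = [
--         tok if tok in candnames
--         else next((t for t, n in candnames.items() if n == tok), tok)
--         for tok in candidate_tokens
--     ]
--
--     # Index table: each canonical token -> its first position
--     order_tokens = list(canonical_order) if canonical_order else sorted(candnames.keys())
--     pos = {}
--     for i, t in enumerate(order_tokens):
--         if t not in pos:
--             pos[t] = i
--
--     # Min-reduction: candidate with the smallest canonical position wins
--     best = None  # (position, token)
--     for t in normalized_tokens:
--         p = pos.get(t)
--         if p is not None and (best is None or p < best[0]):
--             best = (p, t)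
--     return best[1] if best is not None else normalized_tokens[0]
-- ===== Notes on version B (the rewrite author's own statement) =====
-- stated objective: alternative
-- what changed: The canonical-order tiebreak scan ('for token in order: if token in normalized: return token', a nested membership scan) is replaced by building a first-occurrence position table over the canonical order once and taking a min-reduction over the normalized candidates; normalization keeps its meaning but becomes a comprehension.
import Mathlib
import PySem

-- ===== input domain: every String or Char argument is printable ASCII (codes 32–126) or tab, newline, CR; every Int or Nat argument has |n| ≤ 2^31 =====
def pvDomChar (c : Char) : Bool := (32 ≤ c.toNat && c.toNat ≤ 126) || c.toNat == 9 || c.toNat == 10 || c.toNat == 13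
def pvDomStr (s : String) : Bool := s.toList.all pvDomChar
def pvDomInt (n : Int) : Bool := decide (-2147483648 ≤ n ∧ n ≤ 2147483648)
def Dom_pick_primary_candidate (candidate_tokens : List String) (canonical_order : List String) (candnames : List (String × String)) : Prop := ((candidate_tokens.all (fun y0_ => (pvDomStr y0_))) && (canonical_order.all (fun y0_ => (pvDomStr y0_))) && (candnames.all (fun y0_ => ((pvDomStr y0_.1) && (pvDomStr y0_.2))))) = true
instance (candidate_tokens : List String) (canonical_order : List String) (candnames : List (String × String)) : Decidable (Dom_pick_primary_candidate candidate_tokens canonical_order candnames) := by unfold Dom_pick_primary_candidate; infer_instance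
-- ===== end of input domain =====

-- B replaces A's canonical-order scan with membership tests by a first-occurrence position
-- table over the canonical order plus a min-reduction over the candidates (objective: alternative).

-- ===== PORT A =====
-- normalization of one token, identical in both Pythons:
-- 'token if token in candnames else next((t for t, n in candnames.items() if n == token), token)'
def pvNormTok (cn : PySem.Dict String String) (tok : String) : String :=
  if cn.contains tok then tok
  else
    match cn.items.find? (fun p => p.2 == tok) with
    | some p => p.1
    | none => tok

def pick_primary_candidate (candidate_tokens : List String) (canonical_order : List String) (candnames : List (String × String)) : Option String :=
  if candidate_tokens = [] then none
  else
    let cn := PySem.Dict.ofList candnames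
    let normalized := candidate_tokens.foldl (fun acc tok => acc ++ [pvNormTok cn tok]) []
    let order := if canonical_order ≠ [] then canonical_order
                 else PySem.List.sorted cn.keys (fun s => s) false
    match order.find? (fun t => normalized.contains t) with
    | some t => some t
    | none => if normalized = [] then none else PySem.List.pyGet? normalized 0

-- ===== PORT B =====
-- one step of building pos: 'if t not in pos: pos[t] = i'
def pvPosStep (d : PySem.Dict String Int) (it : Int × String) : PySem.Dict String Int :=
  if d.contains it.2 then d else d.insert it.2 it.1

-- one step of the min-reduction: 'p = pos.get(t); if p is not None and (best is None or p < best[0]): best = (p, t)'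
def pvBestStep (pos : PySem.Dict String Int) (b : Option (Int × String)) (t : String) : Option (Int × String) :=
  match pos.get? t with
  | none => b
  | some p =>
    match b with
    | none => some (p, t)
    | some (q, _) => if p < q then some (p, t) else b

def pick_primary_candidate_alt (candidate_tokens : List String) (canonical_order : List String) (candnames : List (String × String)) : Option String :=
  if candidate_tokens = [] then none
  else
    let cn := PySem.Dict.ofList candnames
    let normalized := candidate_tokens.map (pvNormTok cn)
    let order := if canonical_order ≠ [] then canonical_order
                 else PySem.List.sorted cn.keys (fun s => s) false
    let pos := (PySem.List.enumerate order).foldl pvPosStep PySem.Dict.empty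
    match normalized.foldl (pvBestStep pos) none with
    | some pt => some pt.2
    | none => PySem.List.pyGet? normalized 0

-- ===== PRECONDITION & SPEC =====
def Spec_pick_primary_candidate (candidate_tokens : List String) (canonical_order : List String) (candnames : List (String × String)) (out : Option String) : Prop := out = pick_primary_candidate_alt candidate_tokens canonical_order candnames
instance (candidate_tokens : List String) (canonical_order : List String) (candnames : List (String × String)) (out : Option String) : Decidable (Spec_pick_primary_candidate candidate_tokens canonical_order candnames out) := by unfold Spec_pick_primary_candidate; infer_instance

-- ===== CLAIM (what is proved, stated in full; the proofs are below) =====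
def Claim_equal_pick_primary_candidate : Prop := ∀ (candidate_tokens : List String) (canonical_order : List String) (candnames : List (String × String)), Dom_pick_primary_candidate candidate_tokens canonical_order candnames → Spec_pick_primary_candidate candidate_tokens canonical_order candnames (pick_primary_candidate candidate_tokens canonical_order candnames)

-- ===== LEMMAS AND PROOFS =====

-- first-occurrence index of t in l
def pvFidx : List String → String → Option Nat
  | [], _ => none
  | a :: l, t => if a = t then some 0 else (pvFidx l t).map (· + 1)

lemma pvFidx_some {l : List String} {t : String} {k : Nat} (h : pvFidx l t = some k) :
    ∃ hk : k < l.length, l[k] = t := by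
  induction l generalizing k with
  | nil => simp [pvFidx] at h
  | cons a l ih =>
    by_cases ha : a = t
    · simp [pvFidx, ha] at h
      exact ⟨by simp [← h], by simp [← h, ha]⟩
    · simp [pvFidx, ha] at h
      obtain ⟨k', hk', rfl⟩ := h
      obtain ⟨h1, h2⟩ := ih hk'
      exact ⟨by simpa using Nat.succ_lt_succ h1, by simpa using h2⟩

lemma pvFidx_le {l : List String} {t : String} {j : Nat} (hj : j < l.length) (h : l[j] = t) :
    ∃ k, pvFidx l t = some k ∧ k ≤ j := by
  induction l generalizing j with
  | nil => simp at hj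
  | cons a l ih =>
    by_cases ha : a = t
    · exact ⟨0, by simp [pvFidx, ha], Nat.zero_le _⟩
    · cases j with
      | zero => simp at h; exact absurd h ha
      | succ j' =>
        obtain ⟨k, hk, hle⟩ := ih (by simpa using Nat.lt_of_succ_lt_succ hj) (by simpa using h)
        exact ⟨k + 1, by simp [pvFidx, ha, hk], Nat.succ_le_succ hle⟩

-- the pos dict built from 'enumerate' stores first-occurrence indices
lemma pvPos_get (l : List String) (s : Int) (d : PySem.Dict String Int) (t : String) :
    ((PySem.List.enumerate l s).foldl pvPosStep d).get? t =
      match d.get? t with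
      | some v => some v
      | none => (pvFidx l t).map (fun k => s + (k : Int)) := by
  induction l generalizing s d with
  | nil =>
    rw [PySem.List.enumerate_nil, List.foldl_nil]
    cases d.get? t <;> simp [pvFidx]
  | cons a l ih =>
    rw [PySem.List.enumerate_cons, List.foldl_cons]
    by_cases hat : a = t
    · subst hat
      cases hd : d.get? a with
      | some v =>
        have hc : d.contains a = true := by
          rw [PySem.Dict.contains_eq_isSome_get?, hd]; rfl
        simp only [pvPosStep, hc, if_true, ih, hd]
      | none =>
        have hc : d.contains a = false := by
          rw [PySem.Dict.contains_eq_isSome_get?, hd]; rfl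
        simp only [pvPosStep, hc, Bool.false_eq_true, if_false, ih,
          PySem.Dict.get?_insert_self]
        simp [pvFidx]
    · have key : ∀ d' : PySem.Dict String Int, d'.get? t = d.get? t →
          ((PySem.List.enumerate l (s + 1)).foldl pvPosStep d').get? t =
            match d.get? t with
            | some v => some v
            | none => (pvFidx (a :: l) t).map (fun k => s + (k : Int)) := by
        intro d' hd'
        rw [ih, hd']
        cases d.get? t with
        | some v => rfl
        | none =>
          have hfa : pvFidx (a :: l) t = (pvFidx l t).map (· + 1) := by
            simp [pvFidx, hat]
          rw [hfa]
          cases hx : pvFidx l t with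
          | none => rfl
          | some k =>
            simp
            ring
      by_cases hc : d.contains a
      · simp only [pvPosStep, hc, if_true]
        exact key d rfl
      · simp only [pvPosStep, hc, Bool.false_eq_true, if_false]
        exact key (d.insert a s) (PySem.Dict.get?_insert_of_ne d s (fun h => hat h.symm))

lemma pvKey_eq (order : List String) (t : String) :
    ((PySem.List.enumerate order).foldl pvPosStep PySem.Dict.empty).get? t =
      (pvFidx order t).map (fun k => (k : Int)) := by
  have he : (PySem.Dict.empty : PySem.Dict String Int).get? t = none := rfl
  rw [pvPos_get, he]
  simp

lemma pvBest_none (pos : PySem.Dict String Int) (ns : List String) (b : Option (Int × String)) :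
    ns.foldl (pvBestStep pos) b = none ↔ b = none ∧ ∀ t ∈ ns, pos.get? t = none := by
  induction ns generalizing b with
  | nil => simp
  | cons a ns ih =>
    rw [List.foldl_cons]
    cases ha : pos.get? a with
    | none =>
      rw [show pvBestStep pos b a = b by simp [pvBestStep, ha]]
      rw [ih]
      constructor
      · rintro ⟨hb, h⟩
        refine ⟨hb, ?_⟩
        intro t ht
        rcases List.mem_cons.mp ht with rfl | ht'
        · exact ha
        · exact h t ht'
      · rintro ⟨hb, h⟩
        exact ⟨hb, fun t ht => h t (List.mem_cons_of_mem _ ht)⟩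
    | some p =>
      have hb' : ∃ z, pvBestStep pos b a = some z := by
        cases b with
        | none => exact ⟨(p, a), by simp [pvBestStep, ha]⟩
        | some qu =>
          simp only [pvBestStep, ha]
          by_cases h : p < qu.1
          · exact ⟨(p, a), by simp [h]⟩
          · exact ⟨qu, by simp [h]⟩
      obtain ⟨z, hz⟩ := hb'
      rw [hz, ih]
      simp only [reduceCtorEq, false_and, false_iff, not_and]
      intro _ h
      have := h a (by simp)
      rw [ha] at this
      exact absurd this (by simp)

lemma pvBest_some (pos : PySem.Dict String Int) (ns : List String) :
    ∀ (b : Option (Int × String)) (p : Int) (t : String),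
      ns.foldl (pvBestStep pos) b = some (p, t) →
      ((b = some (p, t)) ∨ (t ∈ ns ∧ pos.get? t = some p)) ∧
      (∀ q u, b = some (q, u) → p ≤ q) ∧
      (∀ u ∈ ns, ∀ q, pos.get? u = some q → p ≤ q) := by
  induction ns with
  | nil =>
    intro b p t h
    simp only [List.foldl_nil] at h
    subst h
    refine ⟨Or.inl rfl, ?_, by simp⟩
    intro q u hq
    obtain ⟨h1, h2⟩ : p = q ∧ t = u := by simpa using hq
    exact le_of_eq h1
  | cons a ns ih =>
    intro b p t h
    rw [List.foldl_cons] at h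
    obtain ⟨hC, hM1, hM2⟩ := ih (pvBestStep pos b a) p t h
    refine ⟨?_, ?_, ?_⟩
    · rcases hC with hC | hC
      · cases ha : pos.get? a with
        | none =>
          left
          rw [← hC]
          simp [pvBestStep, ha]
        | some pa =>
          cases b with
          | none =>
            have hstep : pvBestStep pos none a = some (pa, a) := by simp [pvBestStep, ha]
            rw [hstep] at hC
            obtain ⟨h1, h2⟩ : pa = p ∧ a = t := by simpa using hC
            right
            subst h1; subst h2
            exact ⟨by simp, ha⟩
          | some qu =>
            by_cases hlt : pa < qu.1
            · have hstep : pvBestStep pos (some qu) a = some (pa, a) := by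
                simp [pvBestStep, ha, hlt]
              rw [hstep] at hC
              obtain ⟨h1, h2⟩ : pa = p ∧ a = t := by simpa using hC
              right
              subst h1; subst h2
              exact ⟨by simp, ha⟩
            · have hstep : pvBestStep pos (some qu) a = some qu := by
                simp [pvBestStep, ha, hlt]
              rw [hstep] at hC
              left
              rw [hC]
      · right
        exact ⟨List.mem_cons_of_mem _ hC.1, hC.2⟩
    · intro q u hq
      subst hq
      cases ha : pos.get? a with
      | none =>
        exact hM1 q u (by simp [pvBestStep, ha])
      | some pa =>
        by_cases hlt : pa < q
        · have := hM1 pa a (by simp [pvBestStep, ha, hlt])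
          omega
        · exact hM1 q u (by simp [pvBestStep, ha, hlt])
    · intro u hu qa hk
      rcases List.mem_cons.mp hu with rfl | hu'
      · cases b with
        | none => exact hM1 qa u (by simp [pvBestStep, hk])
        | some qv =>
          by_cases hlt : qa < qv.1
          · exact hM1 qa u (by simp [pvBestStep, hk, hlt])
          · have := hM1 qv.1 qv.2 (by simp [pvBestStep, hk, hlt])
            omega
      · exact hM2 u hu' qa hk

-- phase-2 core: the min-reduction finds exactly the first canonical-order token among the candidates
lemma pvCore (order ns : List String) :
    (ns.foldl (pvBestStep ((PySem.List.enumerate order).foldl pvPosStep PySem.Dict.empty)) none).map Prod.snd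
      = order.find? (fun t => ns.contains t) := by
  set pos := (PySem.List.enumerate order).foldl pvPosStep PySem.Dict.empty with hpos
  cases hf : order.find? (fun t => ns.contains t) with
  | none =>
    have hnone : ∀ x ∈ order, ns.contains x = false := by
      intro x hx
      have := List.find?_eq_none.mp hf x hx
      simpa using this
    have hkeys : ∀ t ∈ ns, pos.get? t = none := by
      intro t ht
      rw [hpos, pvKey_eq]
      cases hx : pvFidx order t with
      | none => simp
      | some k =>
        exfalso
        obtain ⟨hk, he⟩ := pvFidx_some hx
        have hmem : order[k] ∈ order := List.getElem_mem hk
        have := hnone _ hmem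
        rw [he] at this
        simp [ht] at this
    rw [(pvBest_none pos ns none).mpr ⟨rfl, hkeys⟩]
    rfl
  | some w =>
    rw [List.find?_eq_some_iff_getElem] at hf
    obtain ⟨hw, i, hi, hei, hmin⟩ := hf
    have hwns : w ∈ ns := by simpa using hw
    obtain ⟨kw, hkwf, hkwle⟩ := pvFidx_le hi hei
    have hkw : pos.get? w = some (kw : Int) := by rw [hpos, pvKey_eq, hkwf]; rfl
    cases hb : ns.foldl (pvBestStep pos) none with
    | none =>
      exfalso
      have := ((pvBest_none pos ns none).mp hb).2 w hwns
      rw [hkw] at this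
      exact absurd this (by simp)
    | some pt =>
      obtain ⟨p, t⟩ := pt
      obtain ⟨hC, _, hM⟩ := pvBest_some pos ns none p t hb
      rcases hC with hC | ⟨htns, hkt⟩
      · exact absurd hC.symm (by simp)
      · have hkt' : (pvFidx order t).map (fun k => (k : Int)) = some p := by
          rw [← pvKey_eq, ← hpos]; exact hkt
        cases hx : pvFidx order t with
        | none => rw [hx] at hkt'; exact absurd hkt' (by simp)
        | some m =>
          rw [hx] at hkt'
          have hpm : (m : Int) = p := by simpa using hkt'
          obtain ⟨hm, hem⟩ := pvFidx_some hx
          have him : i ≤ m := by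
            by_contra hlt
            have hml : m < i := by omega
            have := hmin m hml
            rw [hem] at this
            simp [htns] at this
          have hple : p ≤ (kw : Int) := hM w hwns (kw : Int) hkw
          have hmi : m = i := by omega
          subst hmi
          have : t = w := by rw [← hem, hei]
          simp [this]

-- ===== VERDICT (by name: the statement is the Claim_ definition above) =====
theorem pick_primary_candidate_spec : Claim_equal_pick_primary_candidate := by
  intro ct co cn _hdom
  unfold Spec_pick_primary_candidate pick_primary_candidate pick_primary_candidate_alt
  by_cases hct : ct = []
  · simp [hct]
  · simp only [if_neg hct]
    rw [PySem.List.foldl_append_singleton_eq_map, List.nil_append]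
    set cnD := PySem.Dict.ofList cn with hcnD
    set ns := ct.map (pvNormTok cnD) with hns
    set order := if co ≠ [] then co else PySem.List.sorted cnD.keys (fun s => s) false with horder
    have hnse : ns ≠ [] := by
      rw [hns]
      simpa using hct
    rw [if_neg hnse]
    rw [← pvCore order ns]
    cases hb : ns.foldl (pvBestStep ((PySem.List.enumerate order).foldl pvPosStep PySem.Dict.empty)) none with
    | none => simp
    | some pt => simp
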